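-- pv_equiv track=rewrite | github.com/gospotcheck/shelf-coordinates | Code/relative_coordinates.py | count_row_objects
-- ===== SOURCE A (Python) =====
-- def count_row_objects(annotations):
--     ''' Count the objects frequencies in each row and append object counts'''
--     ptr = annotations[0][4]
--     count = 0
--     annotations[0].append(count)
--     for box in annotations[1:]:
--         if box[4]!=ptr:
--             count = 0
--             box.append(count)
--             ptr = box[4]
--         else:
--             count+=1
--             box.append(count)
--     return annotations
-- ===== SOURCE B (Python) =====
-- def count_row_objects(annotations):
--     ''' Count the objects frequencies in each row and append object counts'''
--     pos = 0
--     while pos < len(annotations):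
--         key = annotations[pos][4]
--         end = pos + 1
--         while end < len(annotations) and annotations[end][4] == key:
--             end += 1
--         for index in range(end - pos):
--             annotations[pos + index].append(index)
--         pos = end
--     return annotations
-- ===== Notes on version B (the rewrite author's own statement) =====
-- stated objective: alternative
-- what changed: Replaces A's pointer/counter state machine over annotations[1:] with a span-based two-level loop: find each maximal run of equal row-key, then append 0..run-1 to that run's boxes.
-- crash fix: On empty annotations A raises IndexError (annotations[0][4]); B's outer loop body never runs and it returns []. — e.g. on count_row_objects([]): A raises IndexError, B returns []
import Mathlib
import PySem

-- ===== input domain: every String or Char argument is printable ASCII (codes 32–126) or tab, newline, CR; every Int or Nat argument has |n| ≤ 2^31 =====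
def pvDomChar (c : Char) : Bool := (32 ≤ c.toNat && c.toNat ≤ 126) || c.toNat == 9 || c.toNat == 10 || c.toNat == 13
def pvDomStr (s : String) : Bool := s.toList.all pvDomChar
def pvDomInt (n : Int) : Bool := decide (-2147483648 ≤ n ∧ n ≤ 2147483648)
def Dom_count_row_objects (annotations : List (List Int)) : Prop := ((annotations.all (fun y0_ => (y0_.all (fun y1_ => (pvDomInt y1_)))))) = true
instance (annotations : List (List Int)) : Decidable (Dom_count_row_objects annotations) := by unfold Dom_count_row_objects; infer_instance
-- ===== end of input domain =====

-- Both programs mutate the rows in place (append); the equivalence proved here is about the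
-- returned list of rows, which is also the full observable effect on the argument's rows.
-- B replaces A's pointer/counter state machine by a span-based decomposition: find each
-- maximal run of equal row-key, number its boxes 0..run-1, continue after the run.

-- row key b[4]; inside Pre_ every row has length ≥ 5, so getD 4 0 is exactly Python's b[4]
def pvKey (b : List Int) : Int := b.getD 4 0

-- ===== PORT A =====
-- the for-loop over annotations[1:] with state (ptr, count)
def pvALoop : List (List Int) → Int → Int → List (List Int)
  | [], _, _ => []
  | box :: rest, ptr, count =>
    if pvKey box ≠ ptr then (box ++ [(0 : Int)]) :: pvALoop rest (pvKey box) 0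
    else (box ++ [count + 1]) :: pvALoop rest ptr (count + 1)

def count_row_objects (annotations : List (List Int)) : List (List Int) :=
  match annotations with
  | [] => []  -- Python A raises IndexError here (annotations[0][4]); outside Pre_
  | a0 :: rest => (a0 ++ [(0 : Int)]) :: pvALoop rest (pvKey a0) 0

-- ===== PORT B =====
-- inner for-loop: append index, index+1, ... along the current run
def pvBNumber : Int → List (List Int) → List (List Int)
  | _, [] => []
  | i, b :: t => (b ++ [i]) :: pvBNumber (i + 1) t

-- outer while-loop: take the maximal run with the head's key, number it, continue after it.
-- fuel = number of not-yet-processed boxes, makes the while-loop structural; it never runs out.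
def pvBGo : Nat → List (List Int) → List (List Int)
  | _, [] => []
  | 0, _ => []
  | fuel + 1, x :: xs =>
    pvBNumber 0 (x :: xs.takeWhile (fun b => pvKey b == pvKey x))
      ++ pvBGo fuel (xs.dropWhile (fun b => pvKey b == pvKey x))

def count_row_objects_alt (annotations : List (List Int)) : List (List Int) :=
  pvBGo annotations.length annotations

-- ===== PRECONDITION & SPEC =====
-- Pre_: exactly the inputs on which Python A returns (A raises IndexError on empty input
-- and whenever some row has fewer than 5 entries)
def Pre_count_row_objects (annotations : List (List Int)) : Prop :=
  annotations ≠ [] ∧ ∀ a ∈ annotations, 5 ≤ a.length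
instance (annotations : List (List Int)) : Decidable (Pre_count_row_objects annotations) := by
  unfold Pre_count_row_objects; infer_instance

def pvWitness_count_row_objects : List (List Int) :=
  [[0, 0, 0, 0, 1], [0, 0, 0, 0, 1], [0, 0, 0, 0, 2]]

-- On empty annotations A raises IndexError (annotations[0][4]); B returns [].
def Raises_count_row_objects (annotations : List (List Int)) : Prop := annotations = []
instance (annotations : List (List Int)) : Decidable (Raises_count_row_objects annotations) := by
  unfold Raises_count_row_objects; infer_instance
def pvRaiseWitness_count_row_objects : List (List Int) := []
def pvRaiseWitnessOut_count_row_objects : List (List Int) := []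

def Spec_count_row_objects (annotations : List (List Int)) (out : List (List Int)) : Prop :=
  out = count_row_objects_alt annotations
instance (annotations : List (List Int)) (out : List (List Int)) :
    Decidable (Spec_count_row_objects annotations out) := by
  unfold Spec_count_row_objects; infer_instance

-- ===== CLAIM (what is proved, stated in full; the proofs are below) =====
def Claim_equal_count_row_objects : Prop :=
  ∀ (annotations : List (List Int)), Dom_count_row_objects annotations →
    Pre_count_row_objects annotations →
    Spec_count_row_objects annotations (count_row_objects annotations)

def Claim_raises_count_row_objects : Prop :=
  (∀ (annotations : List (List Int)), Dom_count_row_objects annotations →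
      Raises_count_row_objects annotations → ¬ Pre_count_row_objects annotations) ∧
  (Dom_count_row_objects (pvRaiseWitness_count_row_objects) ∧
   Raises_count_row_objects (pvRaiseWitness_count_row_objects) ∧
   count_row_objects_alt (pvRaiseWitness_count_row_objects) = pvRaiseWitnessOut_count_row_objects)

-- ===== LEMMAS AND PROOFS =====

-- the fuel only needs to dominate the length of the remaining list
theorem pvBGo_congr : ∀ (f1 f2 : Nat) (l : List (List Int)),
    l.length ≤ f1 → l.length ≤ f2 → pvBGo f1 l = pvBGo f2 l := by
  intro f1
  induction f1 with
  | zero =>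
    intro f2 l h1 _
    rw [List.length_eq_zero_iff.mp (Nat.le_zero.mp h1)]
    cases f2 <;> simp [pvBGo]
  | succ f ih =>
    intro f2 l h1 h2
    match l, f2 with
    | [], _ => cases f2 <;> simp [pvBGo]
    | x :: xs, 0 => simp at h2
    | x :: xs, g + 1 =>
      simp only [pvBGo]
      congr 1
      exact ih g _ (le_trans (List.length_dropWhile_le _ _) (Nat.lt_succ_iff.mp h1))
        (le_trans (List.length_dropWhile_le _ _) (Nat.lt_succ_iff.mp h2))

theorem pvBGo_eq_alt (f : Nat) (l : List (List Int)) (h : l.length ≤ f) :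
    pvBGo f l = count_row_objects_alt l :=
  pvBGo_congr f l.length l h le_rfl

-- A's loop from state (ptr, count) first numbers the remaining run of key ptr with
-- count+1, count+2, …, then behaves like B on what is left.
theorem pvALoop_eq (l : List (List Int)) : ∀ (ptr count : Int),
    pvALoop l ptr count =
      pvBNumber (count + 1) (l.takeWhile (fun b => pvKey b == ptr))
        ++ count_row_objects_alt (l.dropWhile (fun b => pvKey b == ptr)) := by
  induction l with
  | nil => intro ptr count; simp [pvALoop, pvBNumber, count_row_objects_alt, pvBGo]
  | cons b t ih =>
    intro ptr count
    by_cases h : pvKey b = ptr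
    · simp [pvALoop, h, pvBNumber, ih]
    · simp only [pvALoop, if_pos (by simpa using h), List.takeWhile_cons,
        List.dropWhile_cons, beq_iff_eq, if_neg h]
      rw [← pvBGo_eq_alt (t.length + 1) (b :: t) (by simp)]
      simp only [pvBGo, pvBNumber]
      rw [pvBGo_eq_alt t.length _ (List.length_dropWhile_le _ _), ih (pvKey b) 0]
      simp

-- ===== VERDICT (by name: the statement is the Claim_ definition above) =====
theorem count_row_objects_spec : Claim_equal_count_row_objects := by
  intro annotations _ _
  unfold Spec_count_row_objects
  match annotations with
  | [] => rfl
  | a0 :: rest =>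
    rw [← pvBGo_eq_alt (rest.length + 1) (a0 :: rest) (by simp)]
    simp only [count_row_objects, pvBGo, pvBNumber]
    rw [pvBGo_eq_alt rest.length _ (List.length_dropWhile_le _ _), pvALoop_eq]
    simp

@[simp]
theorem count_row_objects_raises : Claim_raises_count_row_objects := by
  unfold Claim_raises_count_row_objects
  exact ⟨by intro a _ h hp; exact hp.1 h, by decide⟩
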